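-- pv_equiv track=rewrite | github.com/mohantyk/bioinformatics | week12.py | create_overlap_graph
-- ===== SOURCE A (Python) =====
-- from collections import defaultdict, deque, Counter
--
-- def prefix(kmer):
--     if isinstance(kmer, tuple): # Read pair
--         return tuple(prefix(pattern) for pattern in kmer)
--     return kmer[:-1]
--
-- def suffix(kmer):
--     if isinstance(kmer, tuple): # Read pair
--         return tuple(suffix(pattern) for pattern in kmer)
--     return kmer[1:]
--
-- def create_overlap_graph(kmers):
--     adjacency = defaultdict( list )
--
--     n = len(kmers)
--     for i in range(n):
--         head = kmers[i]
--         for j in range(n):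
--             if i == j: continue
--             tail = kmers[j]
--             if suffix(head) == prefix(tail):
--                 adjacency[head].append(tail)
--
--     return adjacency
-- ===== SOURCE B (Python) =====
-- from collections import defaultdict
--
-- def prefix(kmer):
--     if isinstance(kmer, tuple): # Read pair
--         return tuple(prefix(pattern) for pattern in kmer)
--     return kmer[:-1]
--
-- def suffix(kmer):
--     if isinstance(kmer, tuple): # Read pair
--         return tuple(suffix(pattern) for pattern in kmer)
--     return kmer[1:]
--
-- def create_overlap_graph(kmers):
--     # index every kmer position by its prefix: one pass, then O(1)-ish lookups
--     by_prefix = {}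
--     for j, kmer in enumerate(kmers):
--         by_prefix.setdefault(prefix(kmer), []).append(j)
--
--     adjacency = defaultdict(list)
--     for i, head in enumerate(kmers):
--         for j in by_prefix.get(suffix(head), []):
--             if j != i:
--                 adjacency[head].append(kmers[j])
--     return adjacency
-- ===== Notes on version B (the rewrite author's own statement) =====
-- stated objective: faster
-- what changed: Replaced the all-pairs suffix/prefix comparison with a one-pass dict indexing each kmer position by its prefix, so each head only looks up the positions matching its suffix and skips its own index.
import Mathlib
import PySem

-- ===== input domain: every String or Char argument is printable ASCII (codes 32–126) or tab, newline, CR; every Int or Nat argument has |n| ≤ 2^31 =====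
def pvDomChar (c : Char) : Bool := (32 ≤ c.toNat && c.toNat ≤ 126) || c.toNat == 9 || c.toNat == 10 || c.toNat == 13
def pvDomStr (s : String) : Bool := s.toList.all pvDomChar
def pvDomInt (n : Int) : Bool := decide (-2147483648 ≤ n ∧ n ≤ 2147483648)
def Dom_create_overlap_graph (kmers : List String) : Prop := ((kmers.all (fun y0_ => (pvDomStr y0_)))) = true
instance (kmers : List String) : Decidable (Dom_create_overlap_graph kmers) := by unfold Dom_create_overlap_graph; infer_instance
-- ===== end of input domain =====

-- B replaces A's all-pairs scan with a dict indexing kmer positions by prefix (measured asymptotically faster); return values proved identical on the whole domain.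


-- ===== PORT A =====
-- prefix(kmer) = kmer[:-1] (the tuple 'read pair' branch is unreachable: inputs are strings)
def pvPrefix (s : String) : String := String.ofList (PySem.List.slice s.toList none (some (-1)))
-- suffix(kmer) = kmer[1:]
def pvSuffix (s : String) : String := String.ofList (PySem.List.slice s.toList (some 1) none)

def create_overlap_graph (kmers : List String) : List (String × List String) :=
  let n : Int := kmers.length
  let adjacency : PySem.Dict String (List String) :=
    (PySem.List.pyRange 0 n 1).foldl (fun d i =>
      let head := PySem.List.pyGetD kmers i ""
      (PySem.List.pyRange 0 n 1).foldl (fun d j =>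
        if i == j then d
        else
          let tail := PySem.List.pyGetD kmers j ""
          -- adjacency[head].append(tail) on a defaultdict(list)
          if pvSuffix head == pvPrefix tail then d.modify head [] (· ++ [tail]) else d) d)
      PySem.Dict.empty
  adjacency.items

-- ===== PORT B =====
def create_overlap_graph_alt (kmers : List String) : List (String × List String) :=
  -- by_prefix.setdefault(prefix(kmer), []).append(j)  ≡  modify (prefix kmer) [] (· ++ [j])
  let byPrefix : PySem.Dict String (List Int) :=
    (PySem.List.enumerate kmers 0).foldl
      (fun d p => d.modify (pvPrefix p.2) [] (· ++ [p.1])) PySem.Dict.empty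
  let adjacency : PySem.Dict String (List String) :=
    (PySem.List.enumerate kmers 0).foldl (fun d p =>
      (byPrefix.getD (pvSuffix p.2) []).foldl (fun d j =>
        if j != p.1 then d.modify p.2 [] (· ++ [PySem.List.pyGetD kmers j ""]) else d) d)
      PySem.Dict.empty
  adjacency.items

-- ===== PRECONDITION & SPEC =====
def Spec_create_overlap_graph (kmers : List String) (out : List (String × List String)) : Prop := out = create_overlap_graph_alt kmers
instance (kmers : List String) (out : List (String × List String)) : Decidable (Spec_create_overlap_graph kmers out) := by unfold Spec_create_overlap_graph; infer_instance

-- ===== CLAIM (what is proved, stated in full; the proofs are below) =====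
def Claim_equal_create_overlap_graph : Prop := ∀ (kmers : List String), Dom_create_overlap_graph kmers → Spec_create_overlap_graph kmers (create_overlap_graph kmers)

-- ===== LEMMAS AND PROOFS =====

-- inner-loop equivalence: A's full scan with its skip/match tests equals a fold over the
-- prefix-filtered index list (B's lookup), for any list l of (index, value) pairs consistent with g
theorem inner_eq (i : Int) (hd : String) (c : String) (g : Int → String)
    (l : List (Int × String)) (hg : ∀ q ∈ l, g q.1 = q.2) (d : PySem.Dict String (List String)) :
    l.foldl (fun d q => if i == q.1 then d
      else if c == pvPrefix q.2 then d.modify hd [] (· ++ [q.2]) else d) d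
    = ((l.filter (fun q => pvPrefix q.2 == c)).map (·.1)).foldl
        (fun d j => if j != i then d.modify hd [] (· ++ [g j]) else d) d := by
  induction l generalizing d with
  | nil => rfl
  | cons q l ih =>
    have hq : g q.1 = q.2 := hg q (List.mem_cons_self ..)
    have hg' : ∀ p ∈ l, g p.1 = p.2 := fun p hp => hg p (List.mem_cons_of_mem _ hp)
    simp only [List.foldl_cons, List.filter_cons]
    by_cases h1 : pvPrefix q.2 = c
    · have e2 : (pvPrefix q.2 == c) = true := by simp [h1]
      have e2' : (c == pvPrefix q.2) = true := by simp [h1]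
      by_cases h2 : i = q.1
      · have e1 : (i == q.1) = true := by simp [h2]
        have e3 : (q.1 != i) = false := by simp [h2]
        simp only [e1, e2, e3, if_true, List.map_cons, List.foldl_cons,
          Bool.false_eq_true, if_false, ih hg']
      · have e1 : (i == q.1) = false := by simp [h2]
        have e3 : (q.1 != i) = true := by simp [Ne.symm h2]
        simp only [e1, e2, e2', e3, if_true, List.map_cons, List.foldl_cons,
          Bool.false_eq_true, if_false, hq, ih hg']
    · have e2 : (pvPrefix q.2 == c) = false := by simp; exact fun h => h1 h
      have e2' : (c == pvPrefix q.2) = false := by simp; exact fun h => h1 h.symm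
      by_cases h2 : i = q.1
      · have e1 : (i == q.1) = true := by simp [h2]
        simp only [e1, e2, if_true, Bool.false_eq_true, if_false, ih hg']
      · have e1 : (i == q.1) = false := by simp [h2]
        simp only [e1, e2, e2', Bool.false_eq_true, if_false, ih hg']

-- B's index lookup returns exactly the positions (in order) whose kmer has the given prefix
theorem byPrefix_getD (kmers : List String) (c : String) :
    ((PySem.List.enumerate kmers 0).foldl
      (fun d p => d.modify (pvPrefix p.2) [] (· ++ [p.1])) PySem.Dict.empty).getD c []
    = (((PySem.List.enumerate kmers 0).filter (fun q => pvPrefix q.2 == c)).map (·.1)) := by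
  have h := List.foldl_map (f := fun (p : Int × String) => (pvPrefix p.2, p.1))
    (g := fun (d : PySem.Dict String (List Int)) (q : String × Int) => d.modify q.1 [] (· ++ [q.2]))
    (l := PySem.List.enumerate kmers 0) (init := PySem.Dict.empty)
  rw [show (fun (d : PySem.Dict String (List Int)) (p : Int × String) => d.modify (pvPrefix p.2) [] (· ++ [p.1]))
      = fun d p => (fun (d : PySem.Dict String (List Int)) (q : String × Int) => d.modify q.1 [] (· ++ [q.2])) d ((fun (p : Int × String) => (pvPrefix p.2, p.1)) p) from rfl, ← h]
  rw [PySem.Dict.getD_foldl_modify_append]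
  simp [List.filter_map, Function.comp_def]

theorem create_overlap_graph_eq_alt (kmers : List String) :
    create_overlap_graph kmers = create_overlap_graph_alt kmers := by
  have hg : ∀ q ∈ PySem.List.enumerate kmers 0, PySem.List.pyGetD kmers q.1 "" = q.2 := by
    intro q hq
    rw [PySem.List.mem_enumerate_iff] at hq
    obtain ⟨k, hk, rfl⟩ := hq
    simp only [zero_add]
    rw [PySem.List.pyGetD_eq_getElem _ _ (by positivity) (by exact_mod_cast hk)]
    simp
  have hE : PySem.List.enumerate kmers 0
      = (PySem.List.pyRange 0 (kmers.length : Int) 1).map (fun j => (j, PySem.List.pyGetD kmers j "")) := by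
    simpa using PySem.List.enumerate_eq_map_pyRange (xs := kmers) ""
  unfold create_overlap_graph create_overlap_graph_alt
  simp only []
  congr 1
  conv_lhs => rw [show (PySem.List.pyRange 0 (kmers.length : Int) 1) = (PySem.List.enumerate kmers 0).map (·.1) from by rw [hE]; simp [List.map_map, Function.comp_def]]
  rw [List.foldl_map]
  apply PySem.List.foldl_congr_mem
  intro d p hp
  rw [hg p hp, List.foldl_map]
  calc (PySem.List.enumerate kmers 0).foldl (fun d q =>
        if p.1 == q.1 then d
        else if pvSuffix p.2 == pvPrefix (PySem.List.pyGetD kmers q.1 "") then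
          d.modify p.2 [] (· ++ [PySem.List.pyGetD kmers q.1 ""]) else d) d
      = (PySem.List.enumerate kmers 0).foldl (fun d q =>
        if p.1 == q.1 then d
        else if pvSuffix p.2 == pvPrefix q.2 then d.modify p.2 [] (· ++ [q.2]) else d) d := by
        apply PySem.List.foldl_congr_mem
        intro d q hq
        rw [hg q hq]
    _ = (((PySem.List.enumerate kmers 0).filter (fun q => pvPrefix q.2 == pvSuffix p.2)).map (·.1)).foldl
          (fun d j => if j != p.1 then d.modify p.2 [] (· ++ [PySem.List.pyGetD kmers j ""]) else d) d :=
        inner_eq p.1 p.2 (pvSuffix p.2) (fun j => PySem.List.pyGetD kmers j "") _ hg d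
    _ = _ := by rw [byPrefix_getD]

-- ===== VERDICT (by name: the statement is the Claim_ definition above) =====
theorem create_overlap_graph_spec : Claim_equal_create_overlap_graph := by
  intro kmers _
  unfold Spec_create_overlap_graph
  exact create_overlap_graph_eq_alt kmers
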